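-- pv_equiv track=rewrite | github.com/DCallaz/flitsr | tcm_input.py | find_faults
-- ===== SOURCE A (Python) =====
-- def find_faults(details):
--     actual_faults = {}
--     i = 0
--     for uut in details:
--         if (uut[1] != -1):
--             if (uut[1] not in actual_faults):
--                 actual_faults[uut[1]] = []
--             actual_faults[uut[1]].append(i)
--         i += 1
--     return actual_faults
-- ===== SOURCE B (Python) =====
-- def find_faults(details):
--     faults = dict.fromkeys(u[1] for u in details if u[1] != -1)
--     return {f: [i for i, u in enumerate(details) if u[1] == f] for f in faults}
-- ===== Notes on version B (the rewrite author's own statement) =====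
-- stated objective: alternative
-- what changed: Replaces the single accumulating dict-building pass (membership test, seed with [], append) with first collecting the distinct fault ids in order via dict.fromkeys and then a dict comprehension that rescans details once per fault id to gather its indices.
import Mathlib
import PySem

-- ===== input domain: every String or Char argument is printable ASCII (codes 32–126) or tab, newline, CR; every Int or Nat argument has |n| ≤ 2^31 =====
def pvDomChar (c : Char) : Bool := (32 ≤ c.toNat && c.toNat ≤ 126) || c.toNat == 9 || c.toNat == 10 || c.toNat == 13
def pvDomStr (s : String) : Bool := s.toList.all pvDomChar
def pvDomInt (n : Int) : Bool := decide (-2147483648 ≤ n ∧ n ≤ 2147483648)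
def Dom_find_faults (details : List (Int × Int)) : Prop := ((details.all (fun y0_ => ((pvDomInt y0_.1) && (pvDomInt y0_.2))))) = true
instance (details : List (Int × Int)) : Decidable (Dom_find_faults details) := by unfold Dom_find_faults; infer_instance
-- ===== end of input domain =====

-- B groups indices by first collecting the distinct fault ids and then rescanning per id,
-- instead of A's single accumulating dict pass; objective: alternative decomposition, not speed.

-- ===== PORT A =====
-- A-side helper: the body of A's `for uut in details` loop; state = (the dict, the running counter i)
def pvStepA (st : PySem.Dict Int (List Int) × Int) (uut : Int × Int) :
    PySem.Dict Int (List Int) × Int :=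
  let d := st.1
  let i := st.2
  if uut.2 ≠ -1 then
    -- `if uut[1] not in actual_faults: actual_faults[uut[1]] = []`
    let d := if d.contains uut.2 = false then d.insert uut.2 [] else d
    -- `actual_faults[uut[1]].append(i)` (key is present here)
    (d.modify uut.2 [] (fun l => l ++ [i]), i + 1)
  else (d, i + 1)

def find_faults (details : List (Int × Int)) : List (Int × List Int) :=
  (details.foldl pvStepA (PySem.Dict.empty, 0)).1.items

-- ===== PORT B =====
-- `[i for i, u in enumerate(details) if u[1] == f]`
def pvIdxOf (details : List (Int × Int)) (f : Int) : List Int :=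
  (PySem.List.enumerate details).filterMap (fun p => if p.2.2 = f then some p.1 else none)

def find_faults_alt (details : List (Int × Int)) : List (Int × List Int) :=
  -- `dict.fromkeys(u[1] for u in details if u[1] != -1)`
  let faults := PySem.List.dedup ((details.filter (fun u => u.2 ≠ -1)).map (·.2))
  faults.map (fun f => (f, pvIdxOf details f))

-- ===== PRECONDITION & SPEC =====
def Spec_find_faults (details : List (Int × Int)) (out : List (Int × List Int)) : Prop := out = find_faults_alt details
instance (details : List (Int × Int)) (out : List (Int × List Int)) : Decidable (Spec_find_faults details out) := by unfold Spec_find_faults; infer_instance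

-- ===== CLAIM (what is proved, stated in full; the proofs are below) =====
def Claim_equal_find_faults : Prop := ∀ (details : List (Int × Int)), Dom_find_faults details → Spec_find_faults details (find_faults details)

-- ===== LEMMAS AND PROOFS =====

-- The (fault id, index) pairs A's loop actually appends, starting the counter at i.
def pvPairs : List (Int × Int) → Int → List (Int × Int)
  | [], _ => []
  | u :: rest, i => (if u.2 ≠ -1 then [(u.2, i)] else []) ++ pvPairs rest (i + 1)

theorem pvPairs_fst_ne (details : List (Int × Int)) (i : Int) :
    ∀ p ∈ pvPairs details i, p.1 ≠ -1 := by
  induction details generalizing i with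
  | nil => simp [pvPairs]
  | cons u rest ih =>
    intro p hp
    simp only [pvPairs, List.mem_append] at hp
    rcases hp with hp | hp
    · split at hp <;> simp_all
    · exact ih _ p hp

-- "seed with [] if absent, then append" is exactly one `modify`.
theorem pvSeed_modify (d : PySem.Dict Int (List Int)) (k : Int) (i : Int) :
    (if d.contains k = false then d.insert k [] else d).modify k [] (fun l => l ++ [i])
      = d.modify k [] (fun l => l ++ [i]) := by
  by_cases h : d.contains k = false
  · simp only [h, if_pos, PySem.Dict.modify, PySem.Dict.getD_insert_self,
      PySem.Dict.insert_insert_self, PySem.Dict.getD_of_not_contains d [] h]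
  · simp [h]

theorem pvStepA_neg (d : PySem.Dict Int (List Int)) (i : Int) (u : Int × Int)
    (h : u.2 = -1) : pvStepA (d, i) u = (d, i + 1) := by
  simp [pvStepA, h]

theorem pvStepA_pos (d : PySem.Dict Int (List Int)) (i : Int) (u : Int × Int)
    (h : u.2 ≠ -1) : pvStepA (d, i) u = (d.modify u.2 [] (fun l => l ++ [i]), i + 1) := by
  simp only [pvStepA, h, ne_eq, not_false_iff, ite_true]
  rw [pvSeed_modify]

theorem pvFold_eq (details : List (Int × Int)) :
    ∀ (d : PySem.Dict Int (List Int)) (i : Int),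
    (details.foldl pvStepA (d, i)).1
      = (pvPairs details i).foldl (fun d p => d.modify p.1 [] (fun l => l ++ [p.2])) d := by
  induction details with
  | nil => intro d i; simp [pvPairs]
  | cons u rest ih =>
    intro d i
    rw [List.foldl_cons]
    by_cases h : u.2 = -1
    · rw [pvStepA_neg d i u h, ih]
      simp [pvPairs, h]
    · rw [pvStepA_pos d i u h, ih]
      simp [pvPairs, h]

theorem pvPairs_fst (details : List (Int × Int)) :
    ∀ i : Int, (pvPairs details i).map (·.1)
      = (details.filter (fun u => u.2 ≠ -1)).map (·.2) := by
  induction details with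
  | nil => intro i; simp [pvPairs]
  | cons u rest ih =>
    intro i
    by_cases h : u.2 = -1 <;> simp [pvPairs, h, ih]

theorem pvPairs_snd (details : List (Int × Int)) (f : Int) (hf : f ≠ -1) :
    ∀ i : Int, ((pvPairs details i).filter (fun p => p.1 == f)).map (·.2)
      = (PySem.List.enumerate details i).filterMap
          (fun p => if p.2.2 = f then some p.1 else none) := by
  induction details with
  | nil => intro i; simp [pvPairs, PySem.List.enumerate]
  | cons u rest ih =>
    intro i
    by_cases h : u.2 = f
    · have hne : u.2 ≠ -1 := h ▸ hf
      simp [pvPairs, PySem.List.enumerate, h, ih, hf]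
    · by_cases hne : u.2 = -1
      · simp [pvPairs, PySem.List.enumerate, hne, ih, Ne.symm hf]
      · simp [pvPairs, PySem.List.enumerate, hne, h, ih]

theorem find_faults_eq_items (details : List (Int × Int)) :
    find_faults details
      = ((pvPairs details 0).foldl (fun d p => d.modify p.1 [] (fun l => l ++ [p.2]))
          PySem.Dict.empty).items := by
  unfold find_faults
  rw [pvFold_eq]

-- ===== VERDICT (by name: the statement is the Claim_ definition above) =====

theorem find_faults_spec : Claim_equal_find_faults := by
  unfold Claim_equal_find_faults
  intro details _
  unfold Spec_find_faults
  rw [find_faults_eq_items]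
  set P := pvPairs details 0 with hP
  set D := P.foldl (fun d p => d.modify p.1 [] (fun l => l ++ [p.2])) PySem.Dict.empty with hD
  have hkeys : D.keys = PySem.Set.ofList (P.map (·.1)) := by
    rw [hD, PySem.Dict.keys_foldl_modify_key P (·.1) [] (fun _ p l => l ++ [p.2])]
    simp [PySem.Set.update_nil_left]
  have hnd : D.keys.Nodup := by
    rw [hD]
    exact PySem.Dict.nodup_keys_foldl_modify_key P (·.1) [] (fun _ p l => l ++ [p.2]) _
      (by simp [PySem.Dict.keys_empty])
  rw [PySem.Dict.items_eq_map_keys D hnd []]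
  unfold find_faults_alt
  rw [hkeys]
  have hfaults : PySem.Set.ofList (P.map (·.1))
      = PySem.List.dedup ((details.filter (fun u => u.2 ≠ -1)).map (·.2)) := by
    rw [PySem.List.dedup_eq_ofList, hP, pvPairs_fst]
  rw [hfaults]
  apply List.map_congr_left
  intro f hfmem
  have hfP : f ∈ P.map (·.1) := by
    rw [PySem.List.dedup_eq_ofList, ← pvPairs_fst details 0, ← hP] at hfmem
    exact (PySem.Set.mem_ofList _ _).mp hfmem
  have hf : f ≠ -1 := by
    rcases List.mem_map.mp hfP with ⟨p, hp, rfl⟩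
    exact pvPairs_fst_ne details 0 p hp
  have hval : D.getD f [] = (P.filter (fun p => p.1 == f)).map (·.2) := by
    rw [hD, PySem.Dict.getD_foldl_modify_append P PySem.Dict.empty f]
    simp [PySem.Dict.getD_empty]
  rw [hval]
  rw [hP, pvPairs_snd details f hf 0]
  rfl
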